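-- pv_equiv track=rewrite | github.com/jfabi88/NuovoCodice | src/hgatr/ga/primitives.py | get_coordinates_range
-- ===== SOURCE A (Python) =====
-- def get_coordinates_range(grade_components):
--     """
--     Get the ranges of coordinates for each grade based on the configuration in `global_var`.
--
--     Args:
--         None
--
--     Returns:
--         (List[List[int]]): List of coordinate ranges for each grade.
--     """
--     coordinates_range = []
--
--     for grade in range(len(grade_components)):
--         start_idx = sum(grade_components[:grade])
--         end_idx = sum(grade_components[:grade + 1]) - 1
--         coordinate_range = [start_idx,end_idx]
--         coordinates_range.append(coordinate_range)
--
--     return coordinates_range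
-- ===== SOURCE B (Python) =====
-- def get_coordinates_range(grade_components):
--     coordinates_range = []
--     start = 0
--     for size in grade_components:
--         coordinates_range.append([start, start + size - 1])
--         start += size
--     return coordinates_range
-- ===== Notes on version B (the rewrite author's own statement) =====
-- stated objective: faster
-- what changed: Replaced the per-grade recomputation of prefix sums over slices with a single pass that maintains a running cumulative start index.
import Mathlib
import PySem

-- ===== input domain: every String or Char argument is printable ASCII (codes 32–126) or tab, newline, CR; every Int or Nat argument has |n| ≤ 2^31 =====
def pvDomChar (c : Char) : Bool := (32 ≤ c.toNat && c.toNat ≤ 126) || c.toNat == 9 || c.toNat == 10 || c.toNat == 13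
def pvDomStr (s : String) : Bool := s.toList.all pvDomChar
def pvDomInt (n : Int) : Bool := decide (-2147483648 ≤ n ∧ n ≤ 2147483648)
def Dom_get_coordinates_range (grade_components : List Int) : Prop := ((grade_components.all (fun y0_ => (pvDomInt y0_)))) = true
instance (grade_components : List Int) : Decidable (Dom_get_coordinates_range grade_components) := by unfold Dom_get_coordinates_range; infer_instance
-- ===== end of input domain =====

-- B replaces A's per-grade prefix-sum recomputation with a single pass keeping a running start index (faster, O(n) vs O(n^2)).


-- ===== PORT A =====
-- for grade in range(len(gc)): start = sum(gc[:grade]); end = sum(gc[:grade+1]) - 1; append [start, end]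
def get_coordinates_range (grade_components : List Int) : List (List Int) :=
  (PySem.List.pyRange 0 grade_components.length 1).foldl
    (fun coordinates_range grade =>
      let start_idx := (PySem.List.slice grade_components none (some grade)).sum
      let end_idx := (PySem.List.slice grade_components none (some (grade + 1))).sum - 1
      coordinates_range ++ [[start_idx, end_idx]])
    []

-- ===== PORT B =====
-- single pass: for size in gc: append [start, start+size-1]; start += size
def get_coordinates_range_altGo (start : Int) : List Int → List (List Int)
  | [] => []
  | size :: rest => [start, start + size - 1] :: get_coordinates_range_altGo (start + size) rest

def get_coordinates_range_alt (grade_components : List Int) : List (List Int) :=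
  get_coordinates_range_altGo 0 grade_components

-- ===== PRECONDITION & SPEC =====
def Spec_get_coordinates_range (grade_components : List Int) (out : List (List Int)) : Prop := out = get_coordinates_range_alt grade_components
instance (grade_components : List Int) (out : List (List Int)) : Decidable (Spec_get_coordinates_range grade_components out) := by unfold Spec_get_coordinates_range; infer_instance

-- ===== CLAIM (what is proved, stated in full; the proofs are below) =====
def Claim_equal_get_coordinates_range : Prop := ∀ (grade_components : List Int), Dom_get_coordinates_range grade_components → Spec_get_coordinates_range grade_components (get_coordinates_range grade_components)

-- ===== LEMMAS AND PROOFS =====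

-- A's append-fold is a map over the range
theorem foldl_append_singleton {α β : Type} (f : α → β) (l : List α) (init : List β) :
    l.foldl (fun acc g => acc ++ [f g]) init = init ++ l.map f := by
  induction l generalizing init with
  | nil => simp
  | cons x t ih => simp [List.foldl, ih]

-- closed form for A
theorem get_coordinates_range_eq (gc : List Int) :
    get_coordinates_range gc =
      (List.range gc.length).map
        (fun k => [(gc.take k).sum, (gc.take (k + 1)).sum - 1]) := by
  unfold get_coordinates_range
  rw [foldl_append_singleton
      (fun g => [(PySem.List.slice gc none (some g)).sum,
                 (PySem.List.slice gc none (some (g + 1))).sum - 1])]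
  rw [PySem.List.pyRange_one]
  simp only [List.nil_append, List.map_map, Int.sub_zero, Int.toNat_natCast]
  apply List.map_congr_left
  intro k _
  simp only [Function.comp, Int.zero_add]
  have h1 : PySem.List.slice gc none (some (k : Int)) = gc.take k :=
    PySem.List.slice_to_natCast gc k
  have h2 : PySem.List.slice gc none (some ((k : Int) + 1)) = gc.take (k + 1) := by
    have := PySem.List.slice_to_natCast gc (k + 1)
    simpa using this
  rw [h1, h2]

-- closed form for B's loop
theorem get_coordinates_range_altGo_eq (gc : List Int) :
    ∀ start : Int,
      get_coordinates_range_altGo start gc =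
        (List.range gc.length).map
          (fun k => [start + (gc.take k).sum, start + (gc.take (k + 1)).sum - 1]) := by
  induction gc with
  | nil => intro start; simp [get_coordinates_range_altGo]
  | cons x t ih =>
      intro start
      simp only [get_coordinates_range_altGo, List.length_cons, List.range_succ_eq_map,
        List.map_cons, List.map_map]
      rw [ih (start + x)]
      congr 1
      · simp
      · apply List.map_congr_left
        intro k _
        simp only [Function.comp, List.take_succ_cons, List.sum_cons]
        rw [Int.add_assoc, Int.add_assoc]

-- ===== VERDICT (by name: the statement is the Claim_ definition above) =====
theorem get_coordinates_range_spec : Claim_equal_get_coordinates_range := by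
  intro gc _
  unfold Spec_get_coordinates_range get_coordinates_range_alt
  rw [get_coordinates_range_eq, get_coordinates_range_altGo_eq gc 0]
  simp
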